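-- pv_equiv track=rewrite | github.com/DinanathDash/CSE | SEM_5/Python/Assignment-3/Q1.py | find_top_three_digits
-- ===== SOURCE A (Python) =====
-- def find_top_three_digits(num):
--     digits = [int(digit) for digit in str(num)]
--     sorted_digits = sorted(digits, reverse=True)
--     top_three = []
--     for digit in sorted_digits:
--         if digit not in top_three:
--             top_three.append(digit)
--         if len(top_three) == 3:
--             break
--
--     return top_three
-- ===== SOURCE B (Python) =====
-- def find_top_three_digits(num):
--     present = [False] * 10
--     for ch in str(num):
--         present[int(ch)] = True
--     return [d for d in range(9, -1, -1) if present[d]][:3]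
-- ===== Notes on version B (the rewrite author's own statement) =====
-- stated objective: alternative
-- what changed: Replaces sort-descending + linear dedup-with-break by a 10-slot presence array filled in one pass over str(num), then a fixed scan of digit buckets 9..0 sliced to three.
import Mathlib
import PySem

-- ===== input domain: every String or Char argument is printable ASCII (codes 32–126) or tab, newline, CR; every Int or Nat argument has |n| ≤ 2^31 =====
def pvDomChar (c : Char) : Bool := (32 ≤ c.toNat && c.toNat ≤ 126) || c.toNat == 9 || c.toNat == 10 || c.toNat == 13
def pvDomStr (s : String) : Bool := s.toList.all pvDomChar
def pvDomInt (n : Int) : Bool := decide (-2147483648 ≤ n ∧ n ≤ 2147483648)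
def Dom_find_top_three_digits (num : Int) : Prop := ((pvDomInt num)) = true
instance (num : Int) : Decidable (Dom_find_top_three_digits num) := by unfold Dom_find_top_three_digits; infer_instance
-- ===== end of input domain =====

-- B replaces A's sort-descending + dedup-with-break by a 10-slot presence array scanned 9..0; equivalence proved for num ≥ 0 (both raise ValueError on num < 0).

-- ===== PORT A =====
-- int(digit) on a one-character string digit (= PySem.Int.ofChars? on its char list); under Pre_ every char parses, so the getD default is never used
def pvParse (c : Char) : Int := (PySem.Int.ofChars? [c]).getD 0

-- the for-loop over sorted_digits with the `break` at len(top_three) == 3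
def pvTopLoop : List Int → List Int → List Int
  | [], top => top
  | d :: rest, top =>
    let top' := if top.contains d then top else top ++ [d]
    if top'.length = 3 then top' else pvTopLoop rest top'

def find_top_three_digits (num : Int) : List Int :=
  let digits := (PySem.Int.toStr num).toList.map pvParse
  let sorted_digits := PySem.List.sorted digits (fun d => d) true
  pvTopLoop sorted_digits []

-- ===== PORT B =====
def find_top_three_digits_alt (num : Int) : List Int :=
  let present := (PySem.Int.toStr num).toList.foldl
    (fun p c => PySem.List.pySetD p (pvParse c) true) (List.replicate 10 false)
  PySem.List.slice
    ((PySem.List.pyRange 9 (-1) (-1)).filter (fun d => PySem.List.pyGetD present d false))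
    none (some 3)

-- ===== PRECONDITION & SPEC =====
-- Pre_ excludes exactly the inputs where Python A raises: for num < 0, str(num) starts with '-' and int('-') raises ValueError (B raises identically there).
def Pre_find_top_three_digits (num : Int) : Prop := 0 ≤ num
instance (num : Int) : Decidable (Pre_find_top_three_digits num) := by unfold Pre_find_top_three_digits; infer_instance
def pvWitness_find_top_three_digits : Int := (4555)

def Spec_find_top_three_digits (num : Int) (out : List Int) : Prop := out = find_top_three_digits_alt num
instance (num : Int) (out : List Int) : Decidable (Spec_find_top_three_digits num out) := by unfold Spec_find_top_three_digits; infer_instance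

-- ===== CLAIM (what is proved, stated in full; the proofs are below) =====
def Claim_equal_find_top_three_digits : Prop := ∀ (num : Int), Dom_find_top_three_digits num → Pre_find_top_three_digits num → Spec_find_top_three_digits num (find_top_three_digits num)

-- ===== LEMMAS AND PROOFS =====

-- the ten decimal digit characters
def pvDIG : List Char := ['0','1','2','3','4','5','6','7','8','9']

lemma pvDigitChar_mem (m : Nat) (h : m < 10) : Nat.digitChar m ∈ pvDIG := by
  interval_cases m <;> decide

lemma pvToDigitsCore_mem : ∀ (fuel n : Nat) (acc : List Char),
    (∀ c ∈ acc, c ∈ pvDIG) → ∀ c ∈ Nat.toDigitsCore 10 fuel n acc, c ∈ pvDIG := by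
  intro fuel
  induction fuel with
  | zero => intro n acc hacc c hc; simp [Nat.toDigitsCore] at hc; exact hacc c hc
  | succ f ih =>
    intro n acc hacc c hc
    rw [Nat.toDigitsCore] at hc
    by_cases h0 : n / 10 = 0
    · simp [h0] at hc
      rcases hc with h | h
      · exact h ▸ pvDigitChar_mem _ (Nat.mod_lt _ (by omega))
      · exact hacc c h
    · simp [h0] at hc
      refine ih (n/10) _ ?_ c hc
      intro d hd
      rw [List.mem_cons] at hd
      rcases hd with h | h
      · exact h ▸ pvDigitChar_mem _ (Nat.mod_lt _ (by omega))
      · exact hacc d h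

lemma pvChars_mem (num : Int) (h : 0 ≤ num) :
    ∀ c ∈ (PySem.Int.toStr num).toList, c ∈ pvDIG := by
  rw [PySem.Int.toList_toStr]
  unfold PySem.Int.toChars
  rw [if_neg (by omega)]
  exact pvToDigitsCore_mem _ _ _ (by simp)

lemma pvParse_bounds {c : Char} (h : c ∈ pvDIG) : 0 ≤ pvParse c ∧ pvParse c ≤ 9 := by
  fin_cases h <;> decide

-- A's dedup loop without the break
def pvDed : List Int → List Int → List Int
  | [], acc => acc
  | d :: r, acc => pvDed r (if acc.contains d then acc else acc ++ [d])

lemma pvDed_cons (d : Int) (r acc : List Int) :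
    pvDed (d :: r) acc = if d ∈ acc then pvDed r acc else pvDed r (acc ++ [d]) := by
  by_cases hd : d ∈ acc <;> simp [pvDed, hd]

lemma pvTopLoop_cons (d : Int) (r top : List Int) :
    pvTopLoop (d :: r) top =
      (if d ∈ top then (if top.length = 3 then top else pvTopLoop r top)
       else (if top.length + 1 = 3 then top ++ [d] else pvTopLoop r (top ++ [d]))) := by
  by_cases hd : d ∈ top <;> simp [pvTopLoop, hd]

lemma pvDed_decomp : ∀ (ys acc : List Int), ∃ t, pvDed ys acc = acc ++ t ∧ t.Sublist ys := by
  intro ys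
  induction ys with
  | nil => intro acc; exact ⟨[], by simp [pvDed]⟩
  | cons d r ih =>
    intro acc
    by_cases hd : d ∈ acc
    · obtain ⟨t, ht, hs⟩ := ih acc
      exact ⟨t, by rw [pvDed_cons, if_pos hd, ht], hs.cons d⟩
    · obtain ⟨t, ht, hs⟩ := ih (acc ++ [d])
      exact ⟨d :: t, by rw [pvDed_cons, if_neg hd, ht]; simp, hs.cons₂ d⟩

lemma pvTopLoop_eq_ded : ∀ (ys acc : List Int), acc.length < 3 →
    pvTopLoop ys acc = (pvDed ys acc).take 3 := by
  intro ys
  induction ys with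
  | nil => intro acc h; simp [pvTopLoop, pvDed, List.take_of_length_le (by omega : acc.length ≤ 3)]
  | cons d r ih =>
    intro acc h
    rw [pvTopLoop_cons, pvDed_cons]
    by_cases hd : d ∈ acc
    · rw [if_pos hd, if_pos hd, if_neg (by omega)]
      exact ih acc h
    · rw [if_neg hd, if_neg hd]
      by_cases h3 : acc.length + 1 = 3
      · rw [if_pos h3]
        obtain ⟨t, ht, -⟩ := pvDed_decomp r (acc ++ [d])
        rw [ht, List.take_append_of_le_length (by simp; omega),
          List.take_of_length_le (by simp; omega)]
      · rw [if_neg h3]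
        exact ih (acc ++ [d]) (by simp; omega)

lemma pvDed_mem : ∀ (ys acc : List Int) (x : Int), x ∈ pvDed ys acc ↔ x ∈ acc ∨ x ∈ ys := by
  intro ys
  induction ys with
  | nil => intro acc x; simp [pvDed]
  | cons d r ih =>
    intro acc x
    rw [pvDed_cons]
    by_cases hd : d ∈ acc
    · rw [if_pos hd, ih]
      simp only [List.mem_cons]
      constructor
      · rintro (h | h)
        · exact Or.inl h
        · exact Or.inr (Or.inr h)
      · rintro (h | h | h)
        · exact Or.inl h
        · exact Or.inl (h ▸ hd)
        · exact Or.inr h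
    · rw [if_neg hd, ih]
      simp only [List.mem_append, List.mem_cons]
      tauto

lemma pvDed_nodup : ∀ (ys acc : List Int), acc.Nodup → (pvDed ys acc).Nodup := by
  intro ys
  induction ys with
  | nil => intro acc h; simpa [pvDed] using h
  | cons d r ih =>
    intro acc h
    rw [pvDed_cons]
    by_cases hd : d ∈ acc
    · rw [if_pos hd]; exact ih acc h
    · rw [if_neg hd]
      exact ih (acc ++ [d]) (by simp [List.nodup_append, h]; exact fun a ha he => hd (he ▸ ha))

lemma pvFold_getD : ∀ (cs : List Char) (p : List Bool), p.length = 10 →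
    (∀ c ∈ cs, 0 ≤ pvParse c ∧ pvParse c ≤ 9) → ∀ i : Nat, i < 10 →
    ((cs.foldl (fun p c => PySem.List.pySetD p (pvParse c) true) p).getD i false)
      = (p.getD i false || (cs.map pvParse).contains (i : Int)) := by
  intro cs
  induction cs with
  | nil => intro p hp hb i hi; simp
  | cons c cs ih =>
    intro p hp hb i hi
    have hc := hb c (by simp)
    have hset : PySem.List.pySetD p (pvParse c) true = p.set (pvParse c).toNat true :=
      PySem.List.pySetD_of_nonneg p true hc.1
    rw [List.foldl_cons, hset, ih _ (by simp [hp]) (fun d hd => hb d (by simp [hd])) i hi]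
    by_cases he : (pvParse c).toNat = i
    · have : pvParse c = (i : Int) := by omega
      simp [List.getD, hp, hi, this]
    · have hne : pvParse c ≠ (i : Int) := by omega
      simp [List.getD, List.getElem?_set_ne he, Ne.symm hne]

lemma pvMain (num : Int) (h : 0 ≤ num) :
    find_top_three_digits num = find_top_three_digits_alt num := by
  unfold find_top_three_digits find_top_three_digits_alt
  dsimp only
  set cs := (PySem.Int.toStr num).toList with hcs
  set xs := cs.map pvParse with hxs
  have hxb : ∀ d ∈ xs, 0 ≤ d ∧ d ≤ 9 := by
    intro d hd
    rw [hxs, List.mem_map] at hd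
    obtain ⟨c, hc, rfl⟩ := hd
    exact pvParse_bounds (pvChars_mem num h c hc)
  have hcb : ∀ c ∈ cs, 0 ≤ pvParse c ∧ pvParse c ≤ 9 :=
    fun c hc => pvParse_bounds (pvChars_mem num h c hc)
  set ys := PySem.List.sorted xs (fun d => d) true with hys
  -- B's presence lookup is membership in xs
  have hpres : ∀ d : Int, 0 ≤ d → d ≤ 9 →
      PySem.List.pyGetD (cs.foldl (fun p c => PySem.List.pySetD p (pvParse c) true)
        (List.replicate 10 false)) d false = xs.contains d := by
    intro d h0 h9
    rw [PySem.List.pyGetD_of_nonneg _ _ h0]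
    have := pvFold_getD cs (List.replicate 10 false) (by simp) hcb d.toNat (by omega)
    rw [List.getD_eq_getElem?_getD] at this ⊢
    have hcast : ((d.toNat : Nat) : Int) = d := by omega
    rw [hcast] at this
    simp only [List.getD_eq_getElem?_getD, List.getElem?_replicate] at this
    rw [this]
    simp [hxs]
    intro hx
    split at hx <;> simp_all
  have hrange : PySem.List.pyRange 9 (-1) (-1) = [9,8,7,6,5,4,3,2,1,0] := by decide
  have hfilter : (PySem.List.pyRange 9 (-1) (-1)).filter
      (fun d => PySem.List.pyGetD (cs.foldl (fun p c => PySem.List.pySetD p (pvParse c) true)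
        (List.replicate 10 false)) d false)
      = ([9,8,7,6,5,4,3,2,1,0] : List Int).filter (fun d => xs.contains d) := by
    rw [hrange]
    refine List.filter_congr ?_
    intro d hd
    have : 0 ≤ d ∧ d ≤ 9 := by
      simp at hd; omega
    exact hpres d this.1 this.2
  rw [hfilter]
  have hslice : ∀ l : List Int, PySem.List.slice l none (some 3) = l.take 3 := by
    intro l
    exact PySem.List.slice_to l (by omega : (0:Int) ≤ 3)
  rw [hslice, pvTopLoop_eq_ded ys [] (by simp)]
  congr 1
  -- pvDed ys [] = the descending digit buckets present in xs
  obtain ⟨t, ht, hsub⟩ := pvDed_decomp ys []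
  have hLsorted : (pvDed ys []).Pairwise (fun a b => a > b) := by
    have hys_pw : ys.Pairwise (fun a b => b ≤ a) := PySem.List.sorted_pairwise_rev xs _
    have h1 : (pvDed ys []).Pairwise (fun a b => b ≤ a) := by
      rw [ht]; simpa using List.Pairwise.sublist hsub hys_pw
    have h2 : (pvDed ys []).Nodup := pvDed_nodup ys [] (by simp)
    exact (List.Pairwise.and h1 h2).imp (fun hab => lt_of_le_of_ne hab.1 (Ne.symm hab.2))
  have hGsorted : (([9,8,7,6,5,4,3,2,1,0] : List Int).filter (fun d => xs.contains d)).Pairwise (fun a b => a > b) :=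
    List.Pairwise.filter _ (by decide)
  have hmem : ∀ x, x ∈ pvDed ys [] ↔ x ∈ ([9,8,7,6,5,4,3,2,1,0] : List Int).filter (fun d => xs.contains d) := by
    intro x
    rw [pvDed_mem, List.mem_filter]
    simp only [List.not_mem_nil, false_or]
    rw [hys, PySem.List.mem_sorted]
    constructor
    · intro hx
      have := hxb x hx
      refine ⟨by simp; omega, by simpa using hx⟩
    · intro ⟨_, hx⟩
      simpa using hx
  have hperm : (pvDed ys []).Perm (([9,8,7,6,5,4,3,2,1,0] : List Int).filter (fun d => xs.contains d)) :=
    (List.perm_ext_iff_of_nodup (pvDed_nodup ys [] (by simp))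
      ((by decide : ([9,8,7,6,5,4,3,2,1,0] : List Int).Nodup).filter _)).mpr hmem
  exact List.Perm.eq_of_pairwise (fun a b _ _ hab hba => by omega) hLsorted hGsorted hperm

-- ===== VERDICT (by name: the statement is the Claim_ definition above) =====
theorem find_top_three_digits_spec : Claim_equal_find_top_three_digits := by
  intro num _ hpre
  exact pvMain num hpre
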